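-- pv_equiv track=rewrite | github.com/MendelDebrabandere/ScriptingtalenUgent | Python/Reeks_04/WerkelijkheidEnFictie.py | codeer
-- ===== SOURCE A (Python) =====
-- def codeer_letter(*letters):
--     """
--     >>> codeer_letter('H')
--     'H'
--     >>> codeer_letter('e', 'H')
--     'l'
--     >>> codeer_letter('W', 'y')
--     'U'
--     """
--
--     som = sum(ord(letter.lower()) - ord('a') for letter in letters) % 26
--
--     checkchar = ord('A') if letters[0].isupper() else ord('a')
--     return chr(som + checkchar)
--
-- def codeer(s):
--     """
--     >>> codeer('Henry Walton Jones Jr.')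
--     'Hlrep Uwlehb Wxbrw Ba.'
--     """
--
--     gecodeerd = []
--
--     previous_c = 'a'
--     for c in s:
--         if c.isalpha():
--             gecodeerd.append(codeer_letter(c, previous_c))
--             previous_c = c
--         else:
--             gecodeerd.append(c)
--
--     return ''.join(gecodeerd)
-- ===== SOURCE B (Python) =====
-- def codeer(s):
--     # extract-compute-reassemble: encode all letters in a separate pass, then rebuild
--     letters = [c for c in s if c.isalpha()]
--     prevs = ['a'] + letters[:-1]
--     enc = [chr((ord(c.lower()) - 97 + ord(p.lower()) - 97) % 26
--                + (65 if c.isupper() else 97))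
--            for c, p in zip(letters, prevs)]
--     it = iter(enc)
--     return ''.join(next(it) if c.isalpha() else c for c in s)
-- ===== Notes on version B (the rewrite author's own statement) =====
-- stated objective: alternative
-- what changed: Replaced the stateful single scan (carrying previous_c) by an extract-compute-reassemble decomposition: filter out the letters, pair each with its original predecessor ('a' first), encode them all in one mapping pass, then rebuild the string drawing encoded letters from an iterator.
import Mathlib
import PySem

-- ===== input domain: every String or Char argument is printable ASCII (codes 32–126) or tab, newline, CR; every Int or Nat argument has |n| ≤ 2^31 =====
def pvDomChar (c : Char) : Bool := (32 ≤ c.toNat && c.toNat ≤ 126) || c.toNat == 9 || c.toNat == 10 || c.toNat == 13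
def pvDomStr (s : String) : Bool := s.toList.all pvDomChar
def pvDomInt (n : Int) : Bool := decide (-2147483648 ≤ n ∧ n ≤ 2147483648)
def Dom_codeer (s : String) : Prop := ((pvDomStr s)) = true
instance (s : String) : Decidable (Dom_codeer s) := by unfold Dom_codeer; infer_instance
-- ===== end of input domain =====

-- B replaces A's stateful single scan by an extract-compute-reassemble multi-pass (alternative decomposition, same cost).

-- ===== PORT A =====
-- codeer_letter(c, prev): mod-26 sum of lowered letter offsets, case taken from c (exact on ASCII letters, the only arguments A passes)
def codeerLetter (c prev : Char) : Char :=
  Char.ofNat ((((PySem.Chars.lowerChar c).toNat - 97) + ((PySem.Chars.lowerChar prev).toNat - 97)) % 26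
              + (if PySem.Chars.isupper c then 65 else 97))

-- A's loop: scan s carrying previous_c, encoding alpha chars, copying the rest
def codeerGo : List Char → Char → List Char
  | [], _ => []
  | c :: cs, prev =>
    if PySem.Chars.isalpha c then codeerLetter c prev :: codeerGo cs c
    else c :: codeerGo cs prev

def codeer (s : String) : String := String.ofList (codeerGo s.toList 'a')

-- ===== PORT B =====
-- pass 2 of Source B: zip letters with their predecessors ('a' first) and encode
def altEncode (letters : List Char) : List Char :=
  List.zipWith codeerLetter letters ('a' :: letters.dropLast)

-- pass 3 of Source B: rebuild the string, drawing encoded letters from the iterator list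
def altRebuild : List Char → List Char → List Char
  | [], _ => []
  | c :: cs, es =>
    if PySem.Chars.isalpha c then
      match es with
      | e :: es' => e :: altRebuild cs es'
      | [] => altRebuild cs []
    else c :: altRebuild cs es

def codeer_alt (s : String) : String :=
  String.ofList (altRebuild s.toList (altEncode (s.toList.filter PySem.Chars.isalpha)))

-- ===== PRECONDITION & SPEC =====
def Spec_codeer (s : String) (out : String) : Prop := out = codeer_alt s
instance (s : String) (out : String) : Decidable (Spec_codeer s out) := by unfold Spec_codeer; infer_instance

-- ===== CLAIM (what is proved, stated in full; the proofs are below) =====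
def Claim_equal_codeer : Prop := ∀ (s : String), Dom_codeer s → Spec_codeer s (codeer s)

-- ===== LEMMAS AND PROOFS =====
theorem codeer_main (l : List Char) (p : Char) :
    codeerGo l p
      = altRebuild l (List.zipWith codeerLetter (l.filter PySem.Chars.isalpha)
          (p :: (l.filter PySem.Chars.isalpha).dropLast)) := by
  induction l generalizing p with
  | nil => rfl
  | cons c cs ih =>
    by_cases h : PySem.Chars.isalpha c = true
    · rcases hF : cs.filter PySem.Chars.isalpha with _ | ⟨f, fs⟩
      · simp [codeerGo, altRebuild, h, hF, ih c]
      · have hd : (c :: f :: fs).dropLast = c :: (f :: fs).dropLast := rfl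
        simp only [codeerGo, altRebuild, List.filter_cons, h, if_true, hF, hd, List.zipWith]
        rw [ih c, hF]; rfl
    · simp only [codeerGo, altRebuild, List.filter_cons, h, Bool.false_eq_true, if_false]
      rw [ih p]

-- ===== VERDICT (by name: the statement is the Claim_ definition above) =====
theorem codeer_spec : Claim_equal_codeer := by
  intro s _
  unfold Spec_codeer codeer codeer_alt altEncode
  exact congrArg String.ofList (codeer_main s.toList 'a')
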